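-- pv_equiv track=rewrite | github.com/obi-wan-xenobi/X1Galaxy_AlertBot | alert_bot_pro.py | find_validator_smart
-- ===== SOURCE A (Python) =====
-- def find_validator_smart(query, validators):
--     query = query.strip().lower()
--     if not query: return None, []
--     # 1. Exact ID
--     for v in validators:
--         if query == v.get('identity', '').lower(): return v, []
--     # 2. Exact Name
--     for v in validators:
--         if query == (v.get('name') or "").lower(): return v, []
--     # 3. Partial Name
--     suggestions = [v for v in validators if query in (v.get('name') or "").lower()]
--     if len(suggestions) == 1:
--         return suggestions[0], []
--     return None, suggestions
-- ===== SOURCE B (Python) =====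
-- def find_validator_smart(query, validators):
--     q = query.strip().lower()
--     if not q:
--         return None, []
--     exact_id = None
--     exact_name = None
--     suggestions = []
--     for v in validators:
--         ident = v.get('identity', '').lower()
--         name = (v.get('name') or "").lower()
--         if exact_id is None and q == ident:
--             exact_id = v
--         if exact_name is None and q == name:
--             exact_name = v
--         if q in name:
--             suggestions.append(v)
--     if exact_id is not None:
--         return exact_id, []
--     if exact_name is not None:
--         return exact_name, []
--     if len(suggestions) == 1:
--         return suggestions[0], []
--     return None, suggestions
-- ===== Notes on version B (the rewrite author's own statement) =====
-- stated objective: alternative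
-- what changed: Replaces A's three separate scans over validators (exact-id pass, exact-name pass, substring filter) with a single pass that simultaneously records the first exact-id match, the first exact-name match, and the suggestion list, applying the same priority afterwards.
import Mathlib
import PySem

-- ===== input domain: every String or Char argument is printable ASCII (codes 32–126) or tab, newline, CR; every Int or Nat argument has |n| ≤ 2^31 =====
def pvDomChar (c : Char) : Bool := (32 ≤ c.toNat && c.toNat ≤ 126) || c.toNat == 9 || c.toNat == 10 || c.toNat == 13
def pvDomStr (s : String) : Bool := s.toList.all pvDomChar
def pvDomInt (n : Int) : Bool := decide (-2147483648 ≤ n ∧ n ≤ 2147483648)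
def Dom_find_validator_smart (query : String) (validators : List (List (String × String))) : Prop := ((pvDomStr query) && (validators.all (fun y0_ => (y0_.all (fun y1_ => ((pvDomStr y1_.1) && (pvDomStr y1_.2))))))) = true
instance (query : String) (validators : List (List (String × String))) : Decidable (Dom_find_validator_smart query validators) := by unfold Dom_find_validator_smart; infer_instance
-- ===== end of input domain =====

-- ===== PORT A =====
-- B changes decomposition: one pass over validators instead of A's three scans; same results.
-- shared accessors: lowercased 'identity' (default "") and lowercased 'name' (None/missing -> "")
def fvsIdLow (v : List (String × String)) : String :=
  PySem.Str.lower ((PySem.Dict.mk v).getD "identity" "")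

def fvsNameLow (v : List (String × String)) : String :=
  PySem.Str.lower ((PySem.Dict.mk v).getD "name" "")

def find_validator_smart (query : String) (validators : List (List (String × String))) : (Option (List (String × String))) × (List (List (String × String))) :=
  let q := PySem.Str.lower (PySem.Str.strip query)
  if q = "" then (none, [])
  else
    -- 1. Exact ID
    match validators.find? (fun v => q == fvsIdLow v) with
    | some v => (some v, [])
    | none =>
      -- 2. Exact Name
      match validators.find? (fun v => q == fvsNameLow v) with
      | some v => (some v, [])
      | none =>
        -- 3. Partial Name
        let suggestions := validators.filter (fun v => PySem.Str.isIn q (fvsNameLow v))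
        if suggestions.length = 1 then (suggestions.head?, [])
        else (none, suggestions)

-- ===== PORT B =====
-- one step of B's single pass: update (first exact-id, first exact-name, suggestions)
def fvsStep (q : String)
    (st : Option (List (String × String)) × Option (List (String × String)) × List (List (String × String)))
    (v : List (String × String)) :
    Option (List (String × String)) × Option (List (String × String)) × List (List (String × String)) :=
  let ident := fvsIdLow v
  let name := fvsNameLow v
  ((if st.1.isNone && q == ident then some v else st.1),
   (if st.2.1.isNone && q == name then some v else st.2.1),
   (if PySem.Str.isIn q name then st.2.2 ++ [v] else st.2.2))

def find_validator_smart_alt (query : String) (validators : List (List (String × String))) : (Option (List (String × String))) × (List (List (String × String))) :=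
  let q := PySem.Str.lower (PySem.Str.strip query)
  if q = "" then (none, [])
  else
    let st := validators.foldl (fvsStep q) (none, none, [])
    match st.1 with
    | some v => (some v, [])
    | none =>
      match st.2.1 with
      | some v => (some v, [])
      | none =>
        if st.2.2.length = 1 then (st.2.2.head?, [])
        else (none, st.2.2)

-- ===== PRECONDITION & SPEC =====
def Spec_find_validator_smart (query : String) (validators : List (List (String × String))) (out : (Option (List (String × String))) × (List (List (String × String)))) : Prop := out = find_validator_smart_alt query validators
instance (query : String) (validators : List (List (String × String))) (out : (Option (List (String × String))) × (List (List (String × String)))) : Decidable (Spec_find_validator_smart query validators out) := by unfold Spec_find_validator_smart; infer_instance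

-- ===== CLAIM (what is proved, stated in full; the proofs are below) =====
def Claim_equal_find_validator_smart : Prop := ∀ (query : String) (validators : List (List (String × String))), Dom_find_validator_smart query validators → Spec_find_validator_smart query validators (find_validator_smart query validators)

-- ===== LEMMAS AND PROOFS =====
-- B's single pass computes exactly A's three scans (with running accumulators generalized)
theorem foldl_fvsStep (q : String) (l : List (List (String × String)))
    (a b : Option (List (String × String))) (s : List (List (String × String))) :
    l.foldl (fvsStep q) (a, b, s) =
      ((if a.isSome then a else l.find? (fun v => q == fvsIdLow v)),
       (if b.isSome then b else l.find? (fun v => q == fvsNameLow v)),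
       s ++ l.filter (fun v => PySem.Str.isIn q (fvsNameLow v))) := by
  induction l generalizing a b s with
  | nil => cases a <;> cases b <;> simp
  | cons v t ih =>
    simp only [List.foldl_cons, fvsStep, List.find?_cons, List.filter_cons]
    cases a <;> cases b <;>
      by_cases h1 : q == fvsIdLow v <;>
      by_cases h2 : q == fvsNameLow v <;>
      by_cases h3 : PySem.Chars.isIn q.toList (fvsNameLow v).toList = true <;>
      simp [ih, h1, h2, h3]

-- ===== VERDICT (by name: the statement is the Claim_ definition above) =====
theorem find_validator_smart_spec : Claim_equal_find_validator_smart := by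
  intro query validators _
  unfold Spec_find_validator_smart find_validator_smart find_validator_smart_alt
  simp only [foldl_fvsStep, Option.isSome_none, Bool.false_eq_true, if_false, List.nil_append]
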